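-- pv_equiv track=rewrite | github.com/AlexandrNP/nanobrain | nanobrain/library/workflows/viral_protein_analysis_backup_20250711_133503/steps/pssm_analysis_step.py | _calculate_cluster_size_distribution
-- ===== SOURCE A (Python) =====
-- from typing import Dict, Any, List, Optional
--
-- def _calculate_cluster_size_distribution(pssm_matrices: List[Dict[str, Any]]) -> Dict[str, int]:
--     """Calculate distribution of cluster sizes"""
--     distribution = {'small': 0, 'medium': 0, 'large': 0}
--
--     for pssm_data in pssm_matrices:
--         size = pssm_data['metadata'].get('sequence_count', 0)
--         if size <= 5:
--             distribution['small'] += 1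
--         elif size <= 20:
--             distribution['medium'] += 1
--         else:
--             distribution['large'] += 1
--
--     return distribution
-- ===== SOURCE B (Python) =====
-- from bisect import bisect_right
-- from typing import Dict, Any, List
--
--
-- def _calculate_cluster_size_distribution(pssm_matrices: List[Dict[str, Any]]) -> Dict[str, int]:
--     """Calculate distribution of cluster sizes (sort once, read off the bucket boundaries)."""
--     sizes = [p['metadata'].get('sequence_count', 0) for p in pssm_matrices]
--     sizes.sort()
--     small = bisect_right(sizes, 5)
--     medium = bisect_right(sizes, 20) - small
--     large = len(sizes) - small - medium
--     return {'small': small, 'medium': medium, 'large': large}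
-- ===== Notes on version B (the rewrite author's own statement) =====
-- stated objective: alternative
-- what changed: Replaces the element-by-element branch-and-increment over a mutable dict by extracting all sizes, sorting them once and reading the three bucket counts off the boundary positions with bisect_right.
import Mathlib
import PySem

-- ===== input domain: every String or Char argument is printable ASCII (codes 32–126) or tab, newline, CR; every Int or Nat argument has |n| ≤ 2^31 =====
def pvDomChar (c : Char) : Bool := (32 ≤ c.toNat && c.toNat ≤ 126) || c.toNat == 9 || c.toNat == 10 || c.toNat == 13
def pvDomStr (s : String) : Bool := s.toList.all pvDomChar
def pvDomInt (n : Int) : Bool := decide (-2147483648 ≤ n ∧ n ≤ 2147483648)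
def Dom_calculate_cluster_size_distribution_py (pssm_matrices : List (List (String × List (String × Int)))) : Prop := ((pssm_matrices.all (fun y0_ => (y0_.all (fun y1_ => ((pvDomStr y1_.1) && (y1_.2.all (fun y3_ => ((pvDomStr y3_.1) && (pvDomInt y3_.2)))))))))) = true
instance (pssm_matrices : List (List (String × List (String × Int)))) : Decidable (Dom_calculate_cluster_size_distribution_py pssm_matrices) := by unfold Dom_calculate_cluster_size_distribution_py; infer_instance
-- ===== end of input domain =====

-- B sorts the extracted sizes once and reads the three bucket counts off the boundary
-- positions with bisect_right, instead of A's per-element branch-and-increment on a dict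
-- (objective: alternative algorithm, similar cost).

-- ===== PORT A =====
def calculate_cluster_size_distribution_py (pssm_matrices : List (List (String × List (String × Int)))) : List (String × Int) :=
  (pssm_matrices.foldl
    (fun distribution pssm_data =>
      match (PySem.Dict.mk pssm_data).get? "metadata" with
      | none => distribution  -- Python raises KeyError here; excluded by Pre_
      | some md =>
        let size := (PySem.Dict.mk md).getD "sequence_count" 0
        if size ≤ 5 then distribution.modify "small" 0 (· + 1)
        else if size ≤ 20 then distribution.modify "medium" 0 (· + 1)
        else distribution.modify "large" 0 (· + 1))
    (PySem.Dict.mk [("small", 0), ("medium", 0), ("large", 0)])).items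

-- ===== PORT B =====
def calculate_cluster_size_distribution_py_alt (pssm_matrices : List (List (String × List (String × Int)))) : List (String × Int) :=
  -- in the comprehension p['metadata'] raises KeyError when absent (excluded by Pre_)
  let sizes : List Int := pssm_matrices.map
    (fun p => (PySem.Dict.mk (((PySem.Dict.mk p).get? "metadata").getD [])).getD "sequence_count" 0)
  let ss := PySem.List.sorted sizes (fun x => x) false   -- sizes.sort()
  let small : Int := (PySem.List.bisectRight ss (5 : Int) : Int)
  let medium : Int := (PySem.List.bisectRight ss (20 : Int) : Int) - small
  let large : Int := (sizes.length : Int) - small - medium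
  (PySem.Dict.mk [("small", small), ("medium", medium), ("large", large)]).items

-- ===== PRECONDITION & SPEC =====
-- Pre_ excludes exactly the inputs on which Python A raises KeyError: an element dict
-- without the key "metadata".
def Pre_calculate_cluster_size_distribution_py (pssm_matrices : List (List (String × List (String × Int)))) : Prop :=
  ∀ p ∈ pssm_matrices, ((PySem.Dict.mk p).get? "metadata").isSome = true
instance (pssm_matrices : List (List (String × List (String × Int)))) : Decidable (Pre_calculate_cluster_size_distribution_py pssm_matrices) := by unfold Pre_calculate_cluster_size_distribution_py; infer_instance
def pvWitness_calculate_cluster_size_distribution_py : (List (List (String × List (String × Int)))) :=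
  [[("metadata", [("sequence_count", 3)])], [("metadata", [("sequence_count", 25)])]]
def Spec_calculate_cluster_size_distribution_py (pssm_matrices : List (List (String × List (String × Int)))) (out : List (String × Int)) : Prop := out = calculate_cluster_size_distribution_py_alt pssm_matrices
instance (pssm_matrices : List (List (String × List (String × Int)))) (out : List (String × Int)) : Decidable (Spec_calculate_cluster_size_distribution_py pssm_matrices out) := by unfold Spec_calculate_cluster_size_distribution_py; infer_instance

-- ===== CLAIM (what is proved, stated in full; the proofs are below) =====
def Claim_equal_calculate_cluster_size_distribution_py : Prop := ∀ (pssm_matrices : List (List (String × List (String × Int)))), Dom_calculate_cluster_size_distribution_py pssm_matrices → Pre_calculate_cluster_size_distribution_py pssm_matrices → Spec_calculate_cluster_size_distribution_py pssm_matrices (calculate_cluster_size_distribution_py pssm_matrices)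

-- ===== LEMMAS AND PROOFS =====

/-- the size A reads from one element (total version; equals A's read under Pre_) -/
def pvSz (p : List (String × List (String × Int))) : Int :=
  (PySem.Dict.mk (((PySem.Dict.mk p).get? "metadata").getD [])).getD "sequence_count" 0

/-- bisect_right on the sorted list counts the elements ≤ x of the original list -/
lemma bisect_count (xs : List Int) (x : Int) :
    PySem.List.bisectRight (PySem.List.sorted xs (fun a => a) false) x
      = xs.countP (fun s => decide (s ≤ x)) := by
  set ss := PySem.List.sorted xs (fun a => a) false with hss
  have hp : ss.Pairwise (fun a b => a ≤ b) := PySem.List.sorted_pairwise xs (fun a => a)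
  obtain ⟨hle, h1, h2⟩ := PySem.List.bisectRight_spec ss x hp
  set k := PySem.List.bisectRight ss x with hk
  have hcp : ss.countP (fun s => decide (s ≤ x)) = xs.countP (fun s => decide (s ≤ x)) :=
    (PySem.List.sorted_perm xs (fun a => a) false).countP_eq _
  rw [← hcp]
  have htk : (ss.take k).countP (fun s => decide (s ≤ x)) = k := by
    have hall : ∀ a ∈ ss.take k, (fun s => decide (s ≤ x)) a = true := by
      intro a ha
      obtain ⟨i, hi, hget⟩ := List.mem_iff_getElem.mp ha
      have hi' : i < k := by
        have := hi; simp only [List.length_take] at this; omega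
      have hilen : i < ss.length := lt_of_lt_of_le hi' hle
      have he : (ss.take k)[i]'hi = ss[i]'hilen := List.getElem_take
      rw [he] at hget
      simpa [← hget] using h1 i hilen hi'
    rw [List.countP_eq_length.mpr hall, List.length_take]
    omega
  have hdk : (ss.drop k).countP (fun s => decide (s ≤ x)) = 0 := by
    rw [List.countP_eq_zero]
    intro a ha
    obtain ⟨i, hi, hget⟩ := List.mem_iff_getElem.mp ha
    have hilen : k + i < ss.length := by
      simp only [List.length_drop] at hi; omega
    have he : (ss.drop k)[i]'hi = ss[k + i]'hilen := by simp
    rw [he] at hget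
    have hlt := h2 (k + i) hilen (by omega)
    simp only [← hget, decide_eq_true_eq]
    omega
  conv_rhs => rw [← List.take_append_drop k ss]
  rw [List.countP_append, htk, hdk]
  omega

/-- A's fold over the 3-entry distribution dict, characterised by three counts -/
lemma foldA (l : List (List (String × List (String × Int)))) (a b c : Int)
    (h : ∀ p ∈ l, ((PySem.Dict.mk p).get? "metadata").isSome = true) :
    l.foldl
      (fun distribution pssm_data =>
        match (PySem.Dict.mk pssm_data).get? "metadata" with
        | none => distribution
        | some md =>
          let size := (PySem.Dict.mk md).getD "sequence_count" 0
          if size ≤ 5 then distribution.modify "small" 0 (· + 1)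
          else if size ≤ 20 then distribution.modify "medium" 0 (· + 1)
          else distribution.modify "large" 0 (· + 1))
      (PySem.Dict.mk [("small", a), ("medium", b), ("large", c)])
    = PySem.Dict.mk
       [("small", a + (l.countP (fun p => decide (pvSz p ≤ 5)) : Int)),
        ("medium", b + (l.countP (fun p => decide (5 < pvSz p ∧ pvSz p ≤ 20)) : Int)),
        ("large", c + (l.countP (fun p => decide (20 < pvSz p)) : Int))] := by
  induction l generalizing a b c with
  | nil => simp
  | cons p t ih =>
    have hp : ((PySem.Dict.mk p).get? "metadata").isSome = true := h p List.mem_cons_self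
    obtain ⟨md, hm⟩ := Option.isSome_iff_exists.mp hp
    have ht : ∀ q ∈ t, ((PySem.Dict.mk q).get? "metadata").isSome = true :=
      fun q hq => h q (List.mem_cons_of_mem _ hq)
    have hsz : pvSz p = (PySem.Dict.mk md).getD "sequence_count" 0 := by
      simp [pvSz, hm]
    simp only [List.foldl_cons, hm, List.countP_cons]
    have hm5 : ((PySem.Dict.mk md).getD "sequence_count" 0 ≤ 5) = (pvSz p ≤ 5) := by rw [hsz]
    have hm20 : ((PySem.Dict.mk md).getD "sequence_count" 0 ≤ 20) = (pvSz p ≤ 20) := by rw [hsz]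
    by_cases h5 : pvSz p ≤ 5
    · rw [if_pos (by rw [hm5]; exact h5)]
      have d5 : (decide (pvSz p ≤ 5)) = true := by simp [h5]
      have dm : (decide (5 < pvSz p ∧ pvSz p ≤ 20)) = false := by
        simp only [decide_eq_false_iff_not]; omega
      have dl : (decide (20 < pvSz p)) = false := by
        simp only [decide_eq_false_iff_not]; omega
      have hmod : (PySem.Dict.mk [("small", a), ("medium", b), ("large", c)]).modify "small" 0 (· + 1)
          = PySem.Dict.mk [("small", a + 1), ("medium", b), ("large", c)] := by
        simp [PySem.Dict.modify, PySem.Dict.insert, PySem.Dict.getD, PySem.Dict.get?]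
      rw [hmod, ih _ _ _ ht]
      simp only [d5, dm, dl, if_true, PySem.Dict.mk.injEq, List.cons.injEq,
        Prod.mk.injEq, and_true, true_and]
      refine ⟨?_, ?_, ?_⟩ <;> push_cast <;> ring
    · rw [if_neg (by rw [hm5]; exact h5)]
      by_cases h20 : pvSz p ≤ 20
      · rw [if_pos (by rw [hm20]; exact h20)]
        have d5 : (decide (pvSz p ≤ 5)) = false := by simp [h5]
        have dm : (decide (5 < pvSz p ∧ pvSz p ≤ 20)) = true := by
          simp only [decide_eq_true_eq]; omega
        have dl : (decide (20 < pvSz p)) = false := by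
          simp only [decide_eq_false_iff_not]; omega
        have hmod : (PySem.Dict.mk [("small", a), ("medium", b), ("large", c)]).modify "medium" 0 (· + 1)
            = PySem.Dict.mk [("small", a), ("medium", b + 1), ("large", c)] := by
          simp [PySem.Dict.modify, PySem.Dict.insert, PySem.Dict.getD, PySem.Dict.get?]
        rw [hmod, ih _ _ _ ht]
        simp only [d5, dm, dl, if_true, PySem.Dict.mk.injEq, List.cons.injEq,
          Prod.mk.injEq, and_true, true_and]
        refine ⟨?_, ?_, ?_⟩ <;> push_cast <;> ring
      · rw [if_neg (by rw [hm20]; exact h20)]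
        have d5 : (decide (pvSz p ≤ 5)) = false := by simp [h5]
        have dm : (decide (5 < pvSz p ∧ pvSz p ≤ 20)) = false := by
          simp only [decide_eq_false_iff_not]; omega
        have dl : (decide (20 < pvSz p)) = true := by
          simp only [decide_eq_true_eq]; omega
        have hmod : (PySem.Dict.mk [("small", a), ("medium", b), ("large", c)]).modify "large" 0 (· + 1)
            = PySem.Dict.mk [("small", a), ("medium", b), ("large", c + 1)] := by
          simp [PySem.Dict.modify, PySem.Dict.insert, PySem.Dict.getD, PySem.Dict.get?]
        rw [hmod, ih _ _ _ ht]
        simp only [d5, dm, dl, if_true, PySem.Dict.mk.injEq, List.cons.injEq,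
          Prod.mk.injEq, and_true, true_and]
        refine ⟨?_, ?_, ?_⟩ <;> push_cast <;> ring

/-- splitting the ≤20 count at 5 -/
lemma count_split (xs : List Int) :
    xs.countP (fun s => decide (s ≤ 20))
      = xs.countP (fun s => decide (s ≤ 5)) + xs.countP (fun s => decide (5 < s ∧ s ≤ 20)) := by
  induction xs with
  | nil => simp
  | cons x t ih =>
    simp only [List.countP_cons, ih]
    split_ifs <;> simp only [decide_eq_true_eq, not_and] at * <;> omega

/-- the three buckets partition the list -/
lemma count_total (xs : List Int) :
    xs.countP (fun s => decide (s ≤ 5)) + xs.countP (fun s => decide (5 < s ∧ s ≤ 20))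
      + xs.countP (fun s => decide (20 < s)) = xs.length := by
  induction xs with
  | nil => simp
  | cons x t ih =>
    simp only [List.countP_cons, List.length_cons, ← ih]
    split_ifs <;> simp only [decide_eq_true_eq, not_and] at * <;> omega

-- ===== VERDICT (by name: the statement is the Claim_ definition above) =====
theorem calculate_cluster_size_distribution_py_spec : Claim_equal_calculate_cluster_size_distribution_py := by
  intro l _ hpre
  show calculate_cluster_size_distribution_py l = calculate_cluster_size_distribution_py_alt l
  unfold calculate_cluster_size_distribution_py calculate_cluster_size_distribution_py_alt
  rw [foldA l 0 0 0 hpre]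
  rw [show (fun p : List (String × List (String × Int)) =>
      (PySem.Dict.mk (((PySem.Dict.mk p).get? "metadata").getD [])).getD "sequence_count" 0) = pvSz from rfl]
  simp only [bisect_count, List.countP_map, Function.comp_def, List.length_map]
  have hsplit := count_split (l.map pvSz)
  have htot := count_total (l.map pvSz)
  simp only [List.countP_map, Function.comp_def, List.length_map] at hsplit htot
  simp only [List.cons.injEq, Prod.mk.injEq, and_true, true_and]
  refine ⟨?_, ?_, ?_⟩ <;> omega
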